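-- pv_equiv track=rewrite | github.com/zssasa/Bioinformatics | Bioinformatics3/week3/AlignmentWithAffineGapPenalties.py | Backtrack
-- ===== SOURCE A (Python) =====
-- def Backtrack(str1, str2, lower, middle, upper, i, j):
-- 	s1 = ''
-- 	s2 = ''
-- 	while i>0 and j>0:
-- 		if middle[i][j] == 3:
-- 			s1 += str1[i-1]
-- 			s2 += str2[j-1]
-- 			i -= 1
-- 			j -= 1
-- 		elif middle[i][j] == 2:
-- 			# s1 += '-'
-- 			# s2 += str2[j-1]
-- 			while upper[i][j] != 2:
-- 				s1 += '-'
-- 				s2 += str2[j-1]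
-- 				j -= 1
-- 			s1 += '-'
-- 			s2 += str2[j-1]
-- 			j -= 1
-- 		elif middle[i][j] == 1:
-- 			while lower[i][j] != 2:
-- 				s1 += str1[i-1]
-- 				s2 += '-'
-- 				i -= 1
-- 			s1 += str1[i-1]
-- 			s2 += '-'
-- 			i -= 1
-- 	return s1[::-1],s2[::-1]
-- ===== SOURCE B (Python) =====
-- def Backtrack(str1, str2, lower, middle, upper, i, j):
-- 	# Flattened three-state machine: one loop, one cell per iteration; 'layer'
-- 	# replaces the original's nested gap-run loops. Output built in lists and
-- 	# joined reversed at the end. Return value only; no argument is mutated.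
-- 	out1 = []
-- 	out2 = []
-- 	layer = 'M'
-- 	while (i > 0 and j > 0) or layer != 'M':
-- 		if layer == 'M':
-- 			p = middle[i][j]
-- 			if p == 3:
-- 				out1.append(str1[i-1])
-- 				out2.append(str2[j-1])
-- 				i -= 1
-- 				j -= 1
-- 			elif p == 2:
-- 				layer = 'U'
-- 			elif p == 1:
-- 				layer = 'L'
-- 		elif layer == 'U':
-- 			closing = upper[i][j] == 2
-- 			out1.append('-')
-- 			out2.append(str2[j-1])
-- 			j -= 1
-- 			if closing:
-- 				layer = 'M'
-- 		else:
-- 			closing = lower[i][j] == 2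
-- 			out1.append(str1[i-1])
-- 			out2.append('-')
-- 			i -= 1
-- 			if closing:
-- 				layer = 'M'
-- 	return ''.join(reversed(out1)), ''.join(reversed(out2))
-- ===== Notes on version B (the rewrite author's own statement) =====
-- stated objective: alternative
-- what changed: A's nested gap-run while-loops are flattened into a single three-state loop (layer = middle/upper/lower) that consumes one cell per iteration and joins list accumulators reversed at the end.
import Mathlib
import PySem

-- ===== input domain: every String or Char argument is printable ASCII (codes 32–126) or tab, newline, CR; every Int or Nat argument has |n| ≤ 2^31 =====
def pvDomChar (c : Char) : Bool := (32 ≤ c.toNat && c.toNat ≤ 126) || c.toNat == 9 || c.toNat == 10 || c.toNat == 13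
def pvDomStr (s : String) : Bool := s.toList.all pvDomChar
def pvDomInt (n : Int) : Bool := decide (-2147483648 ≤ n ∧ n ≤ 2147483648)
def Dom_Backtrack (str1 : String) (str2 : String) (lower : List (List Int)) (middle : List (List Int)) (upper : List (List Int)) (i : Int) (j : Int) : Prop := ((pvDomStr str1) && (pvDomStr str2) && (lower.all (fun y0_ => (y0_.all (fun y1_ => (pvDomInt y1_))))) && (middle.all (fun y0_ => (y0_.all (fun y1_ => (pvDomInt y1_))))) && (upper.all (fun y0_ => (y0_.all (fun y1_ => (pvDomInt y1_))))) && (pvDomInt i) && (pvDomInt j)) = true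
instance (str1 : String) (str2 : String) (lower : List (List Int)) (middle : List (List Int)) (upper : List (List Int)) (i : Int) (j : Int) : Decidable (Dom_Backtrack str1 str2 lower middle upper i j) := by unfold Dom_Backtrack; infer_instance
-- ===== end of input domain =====

-- B flattens A's nested gap-run loops into a single three-state loop (objective: alternative
-- decomposition, same cost); equivalence is proved on well-shaped DP tables (Pre_) where A terminates.

-- shared reads, exact Python semantics: mtx[i][j] and s[k] (in range on every admitted input,
-- so the getD defaults are never used there)
def pvCell (mtx : List (List Int)) (i j : Int) : Int :=
  PySem.List.pyGetD (PySem.List.pyGetD mtx i []) j 0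
def pvChr (s : String) (k : Int) : Char :=
  (PySem.Str.pyGet? s k).getD ' '
-- s[::-1]
def pvRev (s : String) : String :=
  (PySem.Str.slice? s none none (-1)).getD s

-- ===== PORT A =====
-- inner `while upper[i][j] != 2` loop: emits '-'/str2[j-1] and decrements j; fuel models divergence
def pvInnerU (fuel : Nat) (str2 : String) (upper : List (List Int)) (i j : Int) (s1 s2 : String) : Int × String × String :=
  match fuel with
  | 0 => (j, s1, s2)
  | f+1 =>
    if pvCell upper i j ≠ 2 then
      pvInnerU f str2 upper i (j-1) (s1.push '-') (s2.push (pvChr str2 (j-1)))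
    else (j, s1, s2)

-- inner `while lower[i][j] != 2` loop: emits str1[i-1]/'-' and decrements i
def pvInnerL (fuel : Nat) (str1 : String) (lower : List (List Int)) (i j : Int) (s1 s2 : String) : Int × String × String :=
  match fuel with
  | 0 => (i, s1, s2)
  | f+1 =>
    if pvCell lower i j ≠ 2 then
      pvInnerL f str1 lower (i-1) j (s1.push (pvChr str1 (i-1))) (s2.push '-')
    else (i, s1, s2)

-- outer `while i>0 and j>0` loop; on a pointer outside {1,2,3} Python loops forever with unchanged
-- state — transcribed as the same re-entry, so fuel exhaustion models that divergence (outside Pre_)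
def pvOuterA (fuel : Nat) (str1 str2 : String) (lower middle upper : List (List Int)) (i j : Int) (s1 s2 : String) : String × String :=
  match fuel with
  | 0 => (pvRev s1, pvRev s2)
  | f+1 =>
    if i > 0 ∧ j > 0 then
      if pvCell middle i j = 3 then
        pvOuterA f str1 str2 lower middle upper (i-1) (j-1) (s1.push (pvChr str1 (i-1))) (s2.push (pvChr str2 (j-1)))
      else if pvCell middle i j = 2 then
        match pvInnerU j.toNat str2 upper i j s1 s2 with
        | (j', s1', s2') =>
          pvOuterA f str1 str2 lower middle upper i (j'-1) (s1'.push '-') (s2'.push (pvChr str2 (j'-1)))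
      else if pvCell middle i j = 1 then
        match pvInnerL i.toNat str1 lower i j s1 s2 with
        | (i', s1', s2') =>
          pvOuterA f str1 str2 lower middle upper (i'-1) j (s1'.push (pvChr str1 (i'-1))) (s2'.push '-')
      else
        pvOuterA f str1 str2 lower middle upper i j s1 s2
    else (pvRev s1, pvRev s2)

def Backtrack (str1 : String) (str2 : String) (lower : List (List Int)) (middle : List (List Int)) (upper : List (List Int)) (i : Int) (j : Int) : String × String :=
  pvOuterA (i.toNat + j.toNat + 1) str1 str2 lower middle upper i j "" ""

-- ===== PORT B =====
-- single flat loop; layer 0 = middle, 1 = upper, 2 = lower; one cell per consuming iteration,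
-- output accumulated in lists and joined reversed at the end (as in Source B)
def pvLoopB (fuel : Nat) (str1 str2 : String) (lower middle upper : List (List Int)) (layer : Nat) (i j : Int) (o1 o2 : List Char) : String × String :=
  match fuel with
  | 0 => (String.ofList o1.reverse, String.ofList o2.reverse)
  | f+1 =>
    if (i > 0 ∧ j > 0) ∨ layer ≠ 0 then
      if layer = 0 then
        if pvCell middle i j = 3 then
          pvLoopB f str1 str2 lower middle upper 0 (i-1) (j-1) (o1 ++ [pvChr str1 (i-1)]) (o2 ++ [pvChr str2 (j-1)])
        else if pvCell middle i j = 2 then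
          pvLoopB f str1 str2 lower middle upper 1 i j o1 o2
        else if pvCell middle i j = 1 then
          pvLoopB f str1 str2 lower middle upper 2 i j o1 o2
        else
          pvLoopB f str1 str2 lower middle upper 0 i j o1 o2
      else if layer = 1 then
        pvLoopB f str1 str2 lower middle upper (if pvCell upper i j = 2 then 0 else 1) i (j-1) (o1 ++ ['-']) (o2 ++ [pvChr str2 (j-1)])
      else
        pvLoopB f str1 str2 lower middle upper (if pvCell lower i j = 2 then 0 else 2) (i-1) j (o1 ++ [pvChr str1 (i-1)]) (o2 ++ ['-'])
    else (String.ofList o1.reverse, String.ofList o2.reverse)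

def Backtrack_alt (str1 : String) (str2 : String) (lower : List (List Int)) (middle : List (List Int)) (upper : List (List Int)) (i : Int) (j : Int) : String × String :=
  pvLoopB (2 * (i.toNat + j.toNat) + 2) str1 str2 lower middle upper 0 i j [] []

-- ===== PRECONDITION & SPEC =====
-- Pre_ excludes inputs on which A raises IndexError or loops forever (arbitrary tables); beyond the
-- trivially-returning i ≤ 0 / j ≤ 0 inputs it conservatively keeps only well-shaped DP tables whose
-- backtrack pointers are well-formed everywhere, so it also excludes some malformed tables whose bad
-- cells A happens never to visit (see cites).
def Pre_Backtrack (str1 : String) (str2 : String) (lower : List (List Int)) (middle : List (List Int)) (upper : List (List Int)) (i : Int) (j : Int) : Prop :=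
  i ≤ 0 ∨ j ≤ 0 ∨
  (i ≤ (str1.toList.length : Int) ∧ j ≤ (str2.toList.length : Int) ∧
   middle.length = str1.toList.length + 1 ∧
   lower.length = str1.toList.length + 1 ∧
   upper.length = str1.toList.length + 1 ∧
   (∀ row ∈ middle, row.length = str2.toList.length + 1) ∧
   (∀ row ∈ lower, row.length = str2.toList.length + 1) ∧
   (∀ row ∈ upper, row.length = str2.toList.length + 1) ∧
   (∀ row ∈ middle.drop 1, ∀ x ∈ row.drop 1, x = 1 ∨ x = 2 ∨ x = 3) ∧
   (∀ row ∈ upper.drop 1, ∀ x ∈ (row.drop 1).take 1, x = 2) ∧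
   (∀ row ∈ (lower.drop 1).take 1, ∀ x ∈ row.drop 1, x = 2))
instance (str1 : String) (str2 : String) (lower : List (List Int)) (middle : List (List Int)) (upper : List (List Int)) (i : Int) (j : Int) : Decidable (Pre_Backtrack str1 str2 lower middle upper i j) := by unfold Pre_Backtrack; infer_instance

def pvWitness_Backtrack : String × String × List (List Int) × List (List Int) × List (List Int) × Int × Int :=
  ("A", "A", [[0, 0], [0, 2]], [[0, 0], [0, 3]], [[0, 0], [0, 2]], 1, 1)

def Spec_Backtrack (str1 : String) (str2 : String) (lower : List (List Int)) (middle : List (List Int)) (upper : List (List Int)) (i : Int) (j : Int) (out : String × String) : Prop := out = Backtrack_alt str1 str2 lower middle upper i j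
instance (str1 : String) (str2 : String) (lower : List (List Int)) (middle : List (List Int)) (upper : List (List Int)) (i : Int) (j : Int) (out : String × String) : Decidable (Spec_Backtrack str1 str2 lower middle upper i j out) := by unfold Spec_Backtrack; infer_instance

-- ===== CLAIM (what is proved, stated in full; the proofs are below) =====
def Claim_equal_Backtrack : Prop := ∀ (str1 : String) (str2 : String) (lower : List (List Int)) (middle : List (List Int)) (upper : List (List Int)) (i : Int) (j : Int), Dom_Backtrack str1 str2 lower middle upper i j → Pre_Backtrack str1 str2 lower middle upper i j → Spec_Backtrack str1 str2 lower middle upper i j (Backtrack str1 str2 lower middle upper i j)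

-- ===== LEMMAS AND PROOFS =====

theorem mem_drop_one {α : Type} (xs : List α) (k : Nat) (h1 : 1 ≤ k) (h2 : k < xs.length) :
    xs[k] ∈ xs.drop 1 := by
  have h3 : k - 1 < (xs.drop 1).length := by simp; omega
  have : (xs.drop 1)[k-1] = xs[k] := by
    rw [List.getElem_drop]; congr 1; omega
  rw [← this]; exact List.getElem_mem h3

theorem pvCell_eq (mtx : List (List Int)) (i j : Int)
    (h0i : 0 ≤ i) (hilen : i < (mtx.length : Int))
    (h0j : 0 ≤ j) (hjlen : j < ((mtx[i.toNat]'(by omega)).length : Int)) :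
    pvCell mtx i j = (mtx[i.toNat]'(by omega))[j.toNat]'(by omega) := by
  rw [pvCell, PySem.List.pyGetD_eq_getElem _ _ h0i hilen, PySem.List.pyGetD_eq_getElem _ _ h0j hjlen]

theorem pvCell_prop (P : Int → Prop) (mtx : List (List Int)) (i j : Int)
    (hi1 : 1 ≤ i) (hilen : i < (mtx.length : Int)) (hj1 : 1 ≤ j)
    (hjlen : ∀ row ∈ mtx, j < (row.length : Int))
    (hP : ∀ row ∈ mtx.drop 1, ∀ x ∈ row.drop 1, P x) :
    P (pvCell mtx i j) := by
  have hrow : mtx[i.toNat]'(by omega) ∈ mtx := List.getElem_mem (by omega)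
  have hjr := hjlen _ hrow
  rw [pvCell_eq mtx i j (by omega) hilen (by omega) hjr]
  exact hP _ (mem_drop_one mtx i.toNat (by omega) (by omega))
    _ (mem_drop_one _ j.toNat (by omega) (by omega))

theorem mem_drop_take_one {α : Type} (xs : List α) (h : 2 ≤ xs.length) :
    xs[1]'(by omega) ∈ (xs.drop 1).take 1 := by
  have h3 : (0:Nat) < ((xs.drop 1).take 1).length := by simp; omega
  have : ((xs.drop 1).take 1)[0]'h3 = xs[1]'(by omega) := by
    rw [List.getElem_take, List.getElem_drop]
  rw [← this]; exact List.getElem_mem h3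

theorem pvCell_col1 (mtx : List (List Int)) (i : Int)
    (hi1 : 1 ≤ i) (hilen : i < (mtx.length : Int))
    (hrlen : ∀ row ∈ mtx, 2 ≤ row.length)
    (h : ∀ row ∈ mtx.drop 1, ∀ x ∈ (row.drop 1).take 1, x = 2) :
    pvCell mtx i 1 = 2 := by
  have hrow : mtx[i.toNat]'(by omega) ∈ mtx := List.getElem_mem (by omega)
  have hr2 := hrlen _ hrow
  have h1 : (1:Int) < ((mtx[i.toNat]'(by omega)).length : Int) := by exact_mod_cast by omega
  rw [pvCell_eq mtx i 1 (by omega) hilen (by omega) h1]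
  exact h _ (mem_drop_one mtx i.toNat (by omega) (by omega)) _
    (by have := mem_drop_take_one (mtx[i.toNat]'(by omega)) hr2; simpa using this)

theorem pvCell_row1 (mtx : List (List Int)) (j : Int)
    (hj1 : 1 ≤ j) (hlen : 2 ≤ mtx.length)
    (hjlen : ∀ row ∈ mtx, j < (row.length : Int))
    (h : ∀ row ∈ (mtx.drop 1).take 1, ∀ x ∈ row.drop 1, x = 2) :
    pvCell mtx 1 j = 2 := by
  have h1 : (1:Int) < (mtx.length : Int) := by exact_mod_cast by omega
  have hrow : mtx[(1:Nat)]'(by omega) ∈ mtx := List.getElem_mem (by omega)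
  have hjr := hjlen _ hrow
  rw [pvCell_eq mtx 1 j (by omega) h1 (by omega) (by simpa using hjr)]
  have hjr2 : j.toNat < (mtx[(1:Int).toNat]'(by omega)).length := by
    simp only [Int.toNat_one]; omega
  exact h _ (by have := mem_drop_take_one mtx hlen; simpa using this) _
    (mem_drop_one _ j.toNat (by omega) hjr2)

theorem pvRev_eq (s : String) : pvRev s = String.ofList s.toList.reverse := by
  simp [pvRev, PySem.Str.slice?_none_none_neg_one]

theorem pvScanU (str1 str2 : String) (lower middle upper : List (List Int))
    (hUlen : ∀ row ∈ upper, row.length = str2.toList.length + 1)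
    (hUcol : ∀ row ∈ upper.drop 1, ∀ x ∈ (row.drop 1).take 1, x = 2)
    (i : Int) (hi1 : 1 ≤ i) (hiU : i < (upper.length : Int)) :
    ∀ (jn fa fb : Nat) (j : Int) (s1 s2 : String),
    j.toNat = jn → 1 ≤ j → j ≤ (str2.toList.length : Int) → jn ≤ fa → 2 * (i.toNat + jn) < fb →
    ∃ (j' : Int) (s1' s2' : String) (fb' : Nat),
      pvInnerU fa str2 upper i j s1 s2 = (j', s1', s2') ∧
      1 ≤ j' ∧ j' ≤ j ∧
      pvLoopB fb str1 str2 lower middle upper 1 i j s1.toList s2.toList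
        = pvLoopB fb' str1 str2 lower middle upper 0 i (j'-1) (s1'.push '-').toList (s2'.push (pvChr str2 (j'-1))).toList ∧
      2 * (i.toNat + (j'-1).toNat) + 1 < fb' := by
  intro jn
  induction jn with
  | zero =>
    intro fa fb j s1 s2 hjn hj1 _ _ _
    omega
  | succ k ih =>
    intro fa fb j s1 s2 hjn hj1 hjn2 hfa hfb
    obtain ⟨fb0, rfl⟩ : ∃ t, fb = t+1 := ⟨fb-1, by omega⟩
    by_cases hcell : pvCell upper i j = 2
    · refine ⟨j, s1, s2, fb0, ?_, hj1, le_refl j, ?_, by omega⟩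
      · cases fa <;> simp [pvInnerU, hcell]
      · simp [pvLoopB, hcell]
    · -- j ≥ 2, since column 1 of upper holds the sentinel
      have hj2 : 2 ≤ j := by
        by_contra hlt
        have hj1' : j = 1 := by omega
        subst hj1'
        refine hcell (pvCell_col1 upper i hi1 hiU ?_ hUcol)
        intro row hr
        have := hUlen row hr
        omega
      obtain ⟨fa0, rfl⟩ : ∃ t, fa = t+1 := ⟨fa-1, by omega⟩
      obtain ⟨j', s1', s2', fb', heq, hge, hle, hB, hb⟩ :=
        ih fa0 fb0 (j-1) (s1.push '-') (s2.push (pvChr str2 (j-1)))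
          (by omega) (by omega) (by omega) (by omega) (by omega)
      refine ⟨j', s1', s2', fb', ?_, hge, by omega, ?_, hb⟩
      · simpa [pvInnerU, hcell] using heq
      · rw [show pvLoopB (fb0+1) str1 str2 lower middle upper 1 i j s1.toList s2.toList
            = pvLoopB fb0 str1 str2 lower middle upper 1 i (j-1) (s1.toList ++ ['-']) (s2.toList ++ [pvChr str2 (j-1)]) by
              simp [pvLoopB, hcell]]
        simpa using hB

theorem pvScanL (str1 str2 : String) (lower middle upper : List (List Int))
    (hLlen : ∀ row ∈ lower, row.length = str2.toList.length + 1)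
    (hLrow : ∀ row ∈ (lower.drop 1).take 1, ∀ x ∈ row.drop 1, x = 2)
    (hLL : lower.length = str1.toList.length + 1)
    (j : Int) (hj1 : 1 ≤ j) (hjn : j ≤ (str2.toList.length : Int)) :
    ∀ (inn fa fb : Nat) (i : Int) (s1 s2 : String),
    i.toNat = inn → 1 ≤ i → i ≤ (str1.toList.length : Int) → inn ≤ fa → 2 * (inn + j.toNat) < fb →
    ∃ (i' : Int) (s1' s2' : String) (fb' : Nat),
      pvInnerL fa str1 lower i j s1 s2 = (i', s1', s2') ∧
      1 ≤ i' ∧ i' ≤ i ∧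
      pvLoopB fb str1 str2 lower middle upper 2 i j s1.toList s2.toList
        = pvLoopB fb' str1 str2 lower middle upper 0 (i'-1) j (s1'.push (pvChr str1 (i'-1))).toList (s2'.push '-').toList ∧
      2 * ((i'-1).toNat + j.toNat) + 1 < fb' := by
  intro inn
  induction inn with
  | zero =>
    intro fa fb i s1 s2 hin hi1 _ _ _
    omega
  | succ k ih =>
    intro fa fb i s1 s2 hin hi1 him hfa hfb
    obtain ⟨fb0, rfl⟩ : ∃ t, fb = t+1 := ⟨fb-1, by omega⟩
    by_cases hcell : pvCell lower i j = 2
    · refine ⟨i, s1, s2, fb0, ?_, hi1, le_refl i, ?_, by omega⟩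
      · cases fa <;> simp [pvInnerL, hcell]
      · simp [pvLoopB, hcell]
    · have hi2 : 2 ≤ i := by
        by_contra hlt
        have hi1' : i = 1 := by omega
        subst hi1'
        refine hcell (pvCell_row1 lower j hj1 (by omega) ?_ hLrow)
        intro row hr
        have := hLlen row hr
        omega
      obtain ⟨fa0, rfl⟩ : ∃ t, fa = t+1 := ⟨fa-1, by omega⟩
      obtain ⟨i', s1', s2', fb', heq, hge, hle, hB, hb⟩ :=
        ih fa0 fb0 (i-1) (s1.push (pvChr str1 (i-1))) (s2.push '-')
          (by omega) (by omega) (by omega) (by omega) (by omega)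
      refine ⟨i', s1', s2', fb', ?_, hge, by omega, ?_, hb⟩
      · simpa [pvInnerL, hcell] using heq
      · rw [show pvLoopB (fb0+1) str1 str2 lower middle upper 2 i j s1.toList s2.toList
            = pvLoopB fb0 str1 str2 lower middle upper 2 (i-1) j (s1.toList ++ [pvChr str1 (i-1)]) (s2.toList ++ ['-']) by
              simp [pvLoopB, hcell]]
        simpa using hB

theorem pvMain (str1 str2 : String) (lower middle upper : List (List Int))
    (hML : middle.length = str1.toList.length + 1)
    (hLL : lower.length = str1.toList.length + 1)
    (hUL : upper.length = str1.toList.length + 1)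
    (hMlen : ∀ row ∈ middle, row.length = str2.toList.length + 1)
    (hLlen : ∀ row ∈ lower, row.length = str2.toList.length + 1)
    (hUlen : ∀ row ∈ upper, row.length = str2.toList.length + 1)
    (hMptr : ∀ row ∈ middle.drop 1, ∀ x ∈ row.drop 1, x = 1 ∨ x = 2 ∨ x = 3)
    (hUcol : ∀ row ∈ upper.drop 1, ∀ x ∈ (row.drop 1).take 1, x = 2)
    (hLrow : ∀ row ∈ (lower.drop 1).take 1, ∀ x ∈ row.drop 1, x = 2) :
    ∀ (M : Nat), ∀ (fa fb : Nat) (i j : Int) (s1 s2 : String),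
    i.toNat + j.toNat = M → 0 ≤ i → i ≤ (str1.toList.length : Int) → 0 ≤ j → j ≤ (str2.toList.length : Int) →
    M < fa → 2 * M + 1 < fb →
    pvOuterA fa str1 str2 lower middle upper i j s1 s2
      = pvLoopB fb str1 str2 lower middle upper 0 i j s1.toList s2.toList := by
  intro M
  induction M using Nat.strong_induction_on with
  | _ M ih =>
    intro fa fb i j s1 s2 hM h0i him h0j hjn hfa hfb
    obtain ⟨fa0, rfl⟩ : ∃ t, fa = t+1 := ⟨fa-1, by omega⟩
    obtain ⟨fb0, rfl⟩ : ∃ t, fb = t+1 := ⟨fb-1, by omega⟩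
    by_cases hg : i > 0 ∧ j > 0
    · have hcellP : pvCell middle i j = 1 ∨ pvCell middle i j = 2 ∨ pvCell middle i j = 3 := by
        refine pvCell_prop _ middle i j (by omega) (by rw [hML]; push_cast; omega) (by omega) ?_ hMptr
        intro row hr
        have := hMlen row hr
        rw [this]; push_cast; omega
      by_cases hp3 : pvCell middle i j = 3
      · rw [show pvOuterA (fa0+1) str1 str2 lower middle upper i j s1 s2
            = pvOuterA fa0 str1 str2 lower middle upper (i-1) (j-1) (s1.push (pvChr str1 (i-1))) (s2.push (pvChr str2 (j-1))) by
              simp [pvOuterA, hg, hp3]]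
        rw [show pvLoopB (fb0+1) str1 str2 lower middle upper 0 i j s1.toList s2.toList
            = pvLoopB fb0 str1 str2 lower middle upper 0 (i-1) (j-1) (s1.toList ++ [pvChr str1 (i-1)]) (s2.toList ++ [pvChr str2 (j-1)]) by
              simp [pvLoopB, hg, hp3]]
        have := ih (M-2) (by omega) fa0 fb0 (i-1) (j-1) (s1.push (pvChr str1 (i-1))) (s2.push (pvChr str2 (j-1)))
          (by omega) (by omega) (by omega) (by omega) (by omega) (by omega) (by omega)
        simpa using this
      · by_cases hp2 : pvCell middle i j = 2
        · obtain ⟨j', s1', s2', fb', heq, hge, hle, hB, hb⟩ :=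
            pvScanU str1 str2 lower middle upper hUlen hUcol i (by omega) (by rw [hUL]; push_cast; omega)
              j.toNat j.toNat fb0 j s1 s2 rfl (by omega) hjn (le_refl _) (by omega)
          rw [show pvOuterA (fa0+1) str1 str2 lower middle upper i j s1 s2
              = pvOuterA fa0 str1 str2 lower middle upper i (j'-1) (s1'.push '-') (s2'.push (pvChr str2 (j'-1))) by
                simp [pvOuterA, hg, hp2, heq]]
          rw [show pvLoopB (fb0+1) str1 str2 lower middle upper 0 i j s1.toList s2.toList
              = pvLoopB fb0 str1 str2 lower middle upper 1 i j s1.toList s2.toList by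
                simp [pvLoopB, hg, hp2]]
          rw [hB]
          exact ih (i.toNat + (j'-1).toNat) (by omega) fa0 fb' i (j'-1) (s1'.push '-') (s2'.push (pvChr str2 (j'-1)))
            rfl (by omega) him (by omega) (by omega) (by omega) (by omega)
        · have hp1 : pvCell middle i j = 1 := by tauto
          obtain ⟨i', s1', s2', fb', heq, hge, hle, hB, hb⟩ :=
            pvScanL str1 str2 lower middle upper hLlen hLrow hLL j (by omega) hjn
              i.toNat i.toNat fb0 i s1 s2 rfl (by omega) him (le_refl _) (by omega)
          rw [show pvOuterA (fa0+1) str1 str2 lower middle upper i j s1 s2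
              = pvOuterA fa0 str1 str2 lower middle upper (i'-1) j (s1'.push (pvChr str1 (i'-1))) (s2'.push '-') by
                simp [pvOuterA, hg, hp1, heq]]
          rw [show pvLoopB (fb0+1) str1 str2 lower middle upper 0 i j s1.toList s2.toList
              = pvLoopB fb0 str1 str2 lower middle upper 2 i j s1.toList s2.toList by
                simp [pvLoopB, hg, hp1]]
          rw [hB]
          exact ih ((i'-1).toNat + j.toNat) (by omega) fa0 fb' (i'-1) j (s1'.push (pvChr str1 (i'-1))) (s2'.push '-')
            rfl (by omega) (by omega) h0j hjn (by omega) (by omega)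
    · simp [pvOuterA, pvLoopB, hg, pvRev_eq]

-- ===== VERDICT (by name: the statement is the Claim_ definition above) =====
theorem Backtrack_spec : Claim_equal_Backtrack := by
  intro str1 str2 lower middle upper i j _ hpre
  unfold Spec_Backtrack Backtrack Backtrack_alt
  by_cases hg : i > 0 ∧ j > 0
  · rcases hpre with h | h | ⟨him, hjn, hML, hLL, hUL, hMlen, hLlen, hUlen, hMptr, hUcol, hLrow⟩
    · omega
    · omega
    · have := pvMain str1 str2 lower middle upper hML hLL hUL hMlen hLlen hUlen hMptr hUcol hLrow
        (i.toNat + j.toNat) (i.toNat + j.toNat + 1) (2 * (i.toNat + j.toNat) + 2) i j "" ""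
        rfl (by omega) him (by omega) hjn (by omega) (by omega)
      simpa using this
  · obtain ⟨t, ht⟩ : ∃ t, 2 * (i.toNat + j.toNat) + 2 = t + 1 := ⟨2 * (i.toNat + j.toNat) + 1, rfl⟩
    rw [ht]
    simp [pvOuterA, pvLoopB, hg, pvRev_eq]
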